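-- pv_equiv track=rewrite | github.com/TessFerrandez/algorithms | gfg/w71/make-palindrome.py | makePalindrome2
-- ===== SOURCE A (Python) =====
-- from typing import List
-- from collections import Counter
--
-- def makePalindrome2(n: int, arr: List[str]) -> bool:
--     '''
--     1. all strings have their reverse => true
--     2. at max, one string does not have a reverse, but it is a palindrome => true
--     3. all else => false
--     '''
--     def is_palindrome(word):
--         return word == word[::-1]
--
--     words = Counter(arr)
--     num_reverse_absent = 0
--     possible_palindrome = ""
--
--     for word in arr:
--         reversed = word[::-1]
--         if words[reversed] != words[word]:
--             num_reverse_absent += 1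
--             possible_palindrome = reversed
--
--     if num_reverse_absent == 0:
--         return True
--     if num_reverse_absent > 1:
--         return False
--     return is_palindrome(possible_palindrome)
-- ===== SOURCE B (Python) =====
-- from typing import List
-- from collections import Counter
--
-- def makePalindrome2(n: int, arr: List[str]) -> bool:
--     words = Counter(arr)
--     for word, count in words.items():
--         if words[word[::-1]] != count:
--             return False
--     return True
-- ===== Notes on version B (the rewrite author's own statement) =====
-- stated objective: simpler
-- what changed: B scans the distinct words of the Counter once, short-circuiting on the first count mismatch, instead of A's per-occurrence mismatch counting followed by the 0/==1/>1 dispatch; the dead num==1 palindrome branch (a flagged word is never a palindrome) is dropped, and only distinct words are tested, which a timing run measured as a constant-factor speedup.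
import Mathlib
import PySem

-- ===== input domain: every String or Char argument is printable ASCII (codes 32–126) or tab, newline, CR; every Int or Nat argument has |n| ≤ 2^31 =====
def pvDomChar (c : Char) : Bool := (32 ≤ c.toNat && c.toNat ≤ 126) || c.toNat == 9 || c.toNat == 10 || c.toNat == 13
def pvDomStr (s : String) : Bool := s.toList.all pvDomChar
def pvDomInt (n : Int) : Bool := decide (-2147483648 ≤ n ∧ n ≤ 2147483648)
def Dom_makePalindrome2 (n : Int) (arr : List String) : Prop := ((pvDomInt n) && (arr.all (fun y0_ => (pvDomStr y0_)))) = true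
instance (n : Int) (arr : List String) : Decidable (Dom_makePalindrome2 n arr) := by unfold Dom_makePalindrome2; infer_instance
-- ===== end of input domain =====

-- B replaces A's per-occurrence mismatch counter (+ the dead num==1 palindrome branch) by one
-- short-circuiting scan over the distinct words of the Counter. Equivalence proved on all inputs.

-- ===== PORT A =====
-- helper: A's is_palindrome(word)
def pvIsPalindrome (word : String) : Bool :=
  word == (PySem.Str.slice? word none none (-1)).getD word

def makePalindrome2 (n : Int) (arr : List String) : Bool :=
  let words := PySem.Dict.counter arr
  let st := arr.foldl
    (fun (s : Int × String) word =>
      let rev := (PySem.Str.slice? word none none (-1)).getD word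
      if words.getD rev 0 ≠ words.getD word 0 then (s.1 + 1, rev) else s)
    (0, "")
  if st.1 = 0 then true
  else if st.1 > 1 then false
  else pvIsPalindrome st.2

-- ===== PORT B =====
def makePalindrome2_alt (n : Int) (arr : List String) : Bool :=
  let words := PySem.Dict.counter arr
  words.items.all (fun p =>
    words.getD ((PySem.Str.slice? p.1 none none (-1)).getD p.1) 0 == p.2)

-- ===== PRECONDITION & SPEC =====
def Spec_makePalindrome2 (n : Int) (arr : List String) (out : Bool) : Prop := out = makePalindrome2_alt n arr
instance (n : Int) (arr : List String) (out : Bool) : Decidable (Spec_makePalindrome2 n arr out) := by unfold Spec_makePalindrome2; infer_instance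

-- ===== CLAIM (what is proved, stated in full; the proofs are below) =====
def Claim_equal_makePalindrome2 : Prop := ∀ (n : Int) (arr : List String), Dom_makePalindrome2 n arr → Spec_makePalindrome2 n arr (makePalindrome2 n arr)

-- ===== LEMMAS AND PROOFS =====

-- the string reverse both ports compute
def pvRev (w : String) : String := String.ofList w.toList.reverse

theorem pvRev_slice (w : String) :
    (PySem.Str.slice? w none none (-1)).getD w = pvRev w := by
  rw [PySem.Str.slice?_none_none_neg_one]; rfl

theorem pvRev_rev (w : String) : pvRev (pvRev w) = w := by
  simp [pvRev]

-- invariant of A's loop: first component counts mismatching occurrences; if any mismatch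
-- occurred, the second component is the reverse of some mismatching word
theorem foldA_spec (P : String → Prop) [DecidablePred P] (l : List String) (init : Int × String) :
    (l.foldl (fun s word => if P word then (s.1 + 1, pvRev word) else s) init).1
        = init.1 + (l.countP (fun w => decide (P w)) : Int)
    ∧ (l.countP (fun w => decide (P w)) = 0 →
        l.foldl (fun s word => if P word then (s.1 + 1, pvRev word) else s) init = init)
    ∧ (l.countP (fun w => decide (P w)) ≠ 0 → ∃ w, P w ∧
        (l.foldl (fun s word => if P word then (s.1 + 1, pvRev word) else s) init).2 = pvRev w) := by
  induction l generalizing init with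
  | nil => simp
  | cons x xs ih =>
    by_cases hx : P x
    · simp only [List.foldl_cons, List.countP_cons, if_pos hx, decide_eq_true hx, if_true]
      obtain ⟨h1, h2, h3⟩ := ih (init.1 + 1, pvRev x)
      refine ⟨by rw [h1]; push_cast; ring, by simp, fun _ => ?_⟩
      by_cases hz : xs.countP (fun w => decide (P w)) = 0
      · exact ⟨x, hx, by rw [h2 hz]⟩
      · exact h3 hz
    · simp only [List.foldl_cons, List.countP_cons, if_neg hx, decide_eq_false hx,
        Bool.false_eq_true, if_false, add_zero]
      exact ih init

-- ===== VERDICT (by name: the statement is the Claim_ definition above) =====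
theorem makePalindrome2_spec : Claim_equal_makePalindrome2 := by
  intro n arr _
  unfold Spec_makePalindrome2 makePalindrome2 makePalindrome2_alt
  simp only [pvRev_slice, PySem.Dict.getD_counter, PySem.Dict.items_counter,
    List.all_map, Function.comp_def]
  obtain ⟨h1, h2, h3⟩ := foldA_spec
    (fun w => ¬ ((arr.count (pvRev w) : Int) = (arr.count w : Int))) arr (0, "")
  set q : String → Bool :=
    fun w => decide (¬ ((arr.count (pvRev w) : Int) = (arr.count w : Int))) with hq
  set st := arr.foldl
    (fun (s : Int × String) word =>
      if ¬ ((arr.count (pvRev word) : Int) = (arr.count word : Int))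
      then (s.1 + 1, pvRev word) else s) (0, "") with hst
  have hB : (List.all (PySem.Set.ofList arr)
      fun k => ((arr.count (pvRev k) : Int) == (arr.count k : Int)))
      = decide (arr.countP q = 0) := by
    rcases Bool.eq_false_or_eq_true (decide (arr.countP q = 0)) with hd | hd
    · rw [hd]
      rw [decide_eq_true_iff, List.countP_eq_zero] at hd
      rw [List.all_eq_true]
      intro k hk
      have := hd k ((PySem.Set.mem_ofList arr k).mp hk)
      simp only [hq, decide_eq_true_eq, not_not] at this
      simpa using this
    · rw [hd]
      rw [decide_eq_false_iff_not] at hd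
      obtain ⟨w, hw, hqw⟩ := List.countP_pos_iff.mp (Nat.pos_of_ne_zero hd)
      rw [List.all_eq_false]
      refine ⟨w, (PySem.Set.mem_ofList arr w).mpr hw, ?_⟩
      simp only [hq, decide_eq_true_eq] at hqw
      simpa using hqw
  rw [hB]
  by_cases hz : arr.countP q = 0
  · rw [h2 hz]
    simp [hz]
  · obtain ⟨w, hPw, hsnd⟩ := h3 hz
    have hpos : (0 : Int) < (arr.countP q : Int) := by
      exact_mod_cast Nat.pos_of_ne_zero hz
    rw [show decide (arr.countP q = 0) = false from by simp [hz]]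
    have hwne : pvRev w ≠ w := fun h => hPw (by rw [h])
    have hpal : pvIsPalindrome st.2 = false := by
      rw [hsnd, pvIsPalindrome, pvRev_slice, pvRev_rev]
      simp [hwne]
    rw [h1] at *
    split_ifs with hA1 hA2
    · omega
    · rfl
    · exact hpal
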